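-- pv_equiv track=rewrite | github.com/Jopotew/Farmacity_Pick_to_wall | src/led/led_order_controller.py | receive_and_sort_order_wave
-- ===== SOURCE A (Python) =====
-- def receive_and_sort_order_wave(order_wave, grid_config, pos_removed=None):
--     """
--     Distribute orders into a grid based on rows, columns, and optionally remove a position.
--
--     Args:
--         order_wave (dict): Dictionary with multiple orders.
--         grid_config (dict): Dictionary with "rows" and "columns" to define the grid layout.
--         pos_removed (int): Position to be removed from the grid (optional).
--
--     Returns:
--         dict: Dictionary with grid positions as keys and orders (dict) as values.
--     """
--     # Grid dimensions
--     rows = grid_config["rows"]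
--     columns = grid_config["columns"]
--
--     # Generate the grid positions, excluding the removed position if given
--     total_positions = rows * columns
--     grid_positions = [i for i in range(
--         1, total_positions + 1) if i != pos_removed]
--
--     # Prepare the result dictionary
--     sorted_order = {}
--     order_keys = list(order_wave.keys())  # Order keys to iterate
--
--     # Map each order to the available grid positions
--     for idx, position in enumerate(grid_positions):
--         if idx < len(order_keys):
--             # Place the order dict
--             sorted_order[position] = order_wave[order_keys[idx]]
--         else:
--             break  # Stop when there are no more orders
--
--     return sorted_order
-- ===== SOURCE B (Python) =====
-- def receive_and_sort_order_wave(order_wave, grid_config, pos_removed=None):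
--     """Single pass over the orders with a running position counter; no grid list is built."""
--     total_positions = grid_config["rows"] * grid_config["columns"]
--     sorted_order = {}
--     pos = 1
--     for order in order_wave.values():
--         if pos == pos_removed:
--             pos += 1
--         if pos > total_positions:
--             break
--         sorted_order[pos] = order
--         pos += 1
--     return sorted_order
-- ===== Notes on version B (the rewrite author's own statement) =====
-- stated objective: simpler
-- what changed: B makes a single pass over the order values with a running position counter (skipping pos_removed inline), instead of materialising the full rows*columns grid-position list and an order-keys list and indexing into them with enumerate.
import Mathlib
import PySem

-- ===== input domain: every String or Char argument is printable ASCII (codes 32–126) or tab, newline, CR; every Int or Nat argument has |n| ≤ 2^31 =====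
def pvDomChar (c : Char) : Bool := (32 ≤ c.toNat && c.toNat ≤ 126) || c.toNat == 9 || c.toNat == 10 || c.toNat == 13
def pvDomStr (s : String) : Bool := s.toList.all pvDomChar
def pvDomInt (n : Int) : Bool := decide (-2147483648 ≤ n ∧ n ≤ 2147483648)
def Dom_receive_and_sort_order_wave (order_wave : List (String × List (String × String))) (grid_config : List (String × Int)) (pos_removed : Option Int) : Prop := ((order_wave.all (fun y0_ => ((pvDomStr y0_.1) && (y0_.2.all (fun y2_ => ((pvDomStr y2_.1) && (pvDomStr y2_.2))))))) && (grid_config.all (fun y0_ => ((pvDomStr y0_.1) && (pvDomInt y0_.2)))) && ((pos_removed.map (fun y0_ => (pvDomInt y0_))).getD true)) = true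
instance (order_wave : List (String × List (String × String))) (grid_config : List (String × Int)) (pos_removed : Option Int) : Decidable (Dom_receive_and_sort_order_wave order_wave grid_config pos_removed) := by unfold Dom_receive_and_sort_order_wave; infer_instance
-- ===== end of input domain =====

-- B iterates once over the orders with a running position counter instead of materialising the
-- rows*columns grid-position list and an order-key index list (simpler; return-value equivalence).

-- ===== PORT A =====
-- the 'for idx, position in enumerate(grid_positions)' loop with its break and dict assignment
def pvAssign (owd : PySem.Dict String (List (String × String))) (order_keys : List String)
    (positions : List Int) (idx : Nat)
    (sorted_order : PySem.Dict Int (List (String × String))) :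
    PySem.Dict Int (List (String × String)) :=
  match positions with
  | [] => sorted_order
  | position :: rest =>
    if idx < order_keys.length then
      pvAssign owd order_keys rest (idx + 1)
        (sorted_order.insert position (owd.getD (order_keys.getD idx "") []))
    else sorted_order

def receive_and_sort_order_wave (order_wave : List (String × List (String × String))) (grid_config : List (String × Int)) (pos_removed : Option Int) : List (Int × List (String × String)) :=
  let gcd := PySem.Dict.ofList grid_config
  let rows := gcd.getD "rows" 0
  let columns := gcd.getD "columns" 0
  let total_positions := rows * columns
  let grid_positions := (PySem.List.pyRange 1 (total_positions + 1) 1).filter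
    (fun i => !(some i == pos_removed))
  let owd := PySem.Dict.ofList order_wave
  (pvAssign owd owd.keys grid_positions 0 PySem.Dict.empty).items

-- ===== PORT B =====
-- single pass over the order values with a running counter pos
def pvPlace (orders : List (List (String × String))) (pos total : Int) (pos_removed : Option Int) :
    List (Int × List (String × String)) :=
  match orders with
  | [] => []
  | order :: rest =>
    let pos := if some pos == pos_removed then pos + 1 else pos
    if pos ≤ total then (pos, order) :: pvPlace rest (pos + 1) total pos_removed
    else []

def receive_and_sort_order_wave_alt (order_wave : List (String × List (String × String))) (grid_config : List (String × Int)) (pos_removed : Option Int) : List (Int × List (String × String)) :=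
  let gcd := PySem.Dict.ofList grid_config
  let total_positions := gcd.getD "rows" 0 * gcd.getD "columns" 0
  pvPlace (PySem.Dict.ofList order_wave).values 1 total_positions pos_removed

-- ===== PRECONDITION & SPEC =====
-- Pre_ excludes exactly the inputs where A raises KeyError: grid_config missing "rows" or "columns".
def Pre_receive_and_sort_order_wave (order_wave : List (String × List (String × String))) (grid_config : List (String × Int)) (pos_removed : Option Int) : Prop :=
  "rows" ∈ grid_config.map Prod.fst ∧ "columns" ∈ grid_config.map Prod.fst
instance (order_wave : List (String × List (String × String))) (grid_config : List (String × Int)) (pos_removed : Option Int) : Decidable (Pre_receive_and_sort_order_wave order_wave grid_config pos_removed) := by unfold Pre_receive_and_sort_order_wave; infer_instance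

def pvWitness_receive_and_sort_order_wave : (List (String × List (String × String))) × (List (String × Int)) × Option Int :=
  ([("o1", [("item", "milk")]), ("o2", [("item", "soap")])], [("rows", 2), ("columns", 2)], some 2)

def Spec_receive_and_sort_order_wave (order_wave : List (String × List (String × String))) (grid_config : List (String × Int)) (pos_removed : Option Int) (out : List (Int × List (String × String))) : Prop := out = receive_and_sort_order_wave_alt order_wave grid_config pos_removed
instance (order_wave : List (String × List (String × String))) (grid_config : List (String × Int)) (pos_removed : Option Int) (out : List (Int × List (String × String))) : Decidable (Spec_receive_and_sort_order_wave order_wave grid_config pos_removed out) := by unfold Spec_receive_and_sort_order_wave; infer_instance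

-- ===== CLAIM (what is proved, stated in full; the proofs are below) =====
def Claim_equal_receive_and_sort_order_wave : Prop := ∀ (order_wave : List (String × List (String × String))) (grid_config : List (String × Int)) (pos_removed : Option Int), Dom_receive_and_sort_order_wave order_wave grid_config pos_removed → Pre_receive_and_sort_order_wave order_wave grid_config pos_removed → Spec_receive_and_sort_order_wave order_wave grid_config pos_removed (receive_and_sort_order_wave order_wave grid_config pos_removed)

-- ===== LEMMAS AND PROOFS =====

-- A's loop appends (position, idx-th value) pairs: its items are a zip of the remaining positions
-- with the remaining dict values.
theorem pvAssign_items (owd : PySem.Dict String (List (String × String)))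
    (hnd : owd.keys.Nodup) :
    ∀ (positions : List Int) (idx : Nat) (acc : PySem.Dict Int (List (String × String))),
    positions.Nodup → (∀ p ∈ positions, acc.contains p = false) →
    (pvAssign owd owd.keys positions idx acc).items
      = acc.items ++ positions.zip (owd.values.drop idx) := by
  have hlen : owd.keys.length = owd.values.length := by
    simp [PySem.Dict.keys, PySem.Dict.values]
  intro positions
  induction positions with
  | nil => intro idx acc _ _; simp [pvAssign]
  | cons p rest ih =>
    intro idx acc hnd2 hfresh
    by_cases hidx : idx < owd.keys.length
    · have hidxv : idx < owd.values.length := hlen ▸ hidx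
      have hidxi : idx < owd.items.length := by
        simpa [PySem.Dict.keys] using hidx
      have hk : owd.keys[idx]'hidx = (owd.items[idx]'hidxi).1 := by
        simp [PySem.Dict.keys]
      have hv : owd.values[idx]'hidxv = (owd.items[idx]'hidxi).2 := by
        simp [PySem.Dict.values]
      have hitem : (owd.keys[idx]'hidx, owd.values[idx]'hidxv) ∈ owd.items := by
        rw [hk, hv, Prod.mk.eta]
        exact List.getElem_mem hidxi
      have hget : owd.getD (owd.keys.getD idx "") [] = owd.values[idx]'hidxv := by
        rw [List.getD_eq_getElem _ _ hidx]
        exact PySem.Dict.getD_of_mem_items _ hitem hnd _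
      have hdrop : owd.values.drop idx
          = owd.values[idx]'hidxv :: owd.values.drop (idx + 1) :=
        List.drop_eq_getElem_cons hidxv
      have hpc : acc.contains p = false := hfresh p List.mem_cons_self
      have hfresh' : ∀ q ∈ rest, (acc.insert p (owd.getD (owd.keys.getD idx "") [])).contains q = false := by
        intro q hq
        rw [PySem.Dict.contains_insert]
        have h1 : acc.contains q = false := hfresh q (List.mem_cons_of_mem _ hq)
        have h2 : (q == p) = false := beq_eq_false_iff_ne.mpr
          (fun h => (List.nodup_cons.mp hnd2).1 (h ▸ hq))
        simp [h1, h2]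
      simp only [pvAssign, if_pos hidx]
      rw [ih (idx + 1) _ (List.nodup_cons.mp hnd2).2 hfresh',
          PySem.Dict.items_insert_of_not_contains _ _ hpc, hget, hdrop,
          List.zip_cons_cons, List.append_assoc, List.singleton_append]
    · have hdropnil : owd.values.drop idx = [] :=
        List.drop_eq_nil_of_le (by omega)
      simp [pvAssign, hidx, hdropnil]

-- B's loop produces exactly the filtered position range zipped with the orders.
theorem pvPlace_eq (total : Int) (pos_removed : Option Int) :
    ∀ (orders : List (List (String × String))) (pos : Int),
    pvPlace orders pos total pos_removed
      = ((PySem.List.pyRange pos (total + 1) 1).filter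
          (fun i => !(some i == pos_removed))).zip orders := by
  intro orders
  induction orders with
  | nil => intro pos; simp [pvPlace]
  | cons order rest ih =>
    intro pos
    by_cases hle : pos ≤ total
    · rw [show PySem.List.pyRange pos (total + 1) 1
            = pos :: PySem.List.pyRange (pos + 1) (total + 1) 1 from
          PySem.List.pyRange_one_cons (by omega)]
      by_cases hskip : some pos = pos_removed
      · subst hskip
        by_cases hle1 : pos + 1 ≤ total
        · rw [show PySem.List.pyRange (pos + 1) (total + 1) 1
                = (pos + 1) :: PySem.List.pyRange (pos + 1 + 1) (total + 1) 1 from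
              PySem.List.pyRange_one_cons (by omega)]
          have hne : pos + 1 ≠ pos := by omega
          simp [pvPlace, hne, hle1, ih]
        · have hnil : PySem.List.pyRange (pos + 1) (total + 1) 1 = [] := by
            rw [PySem.List.pyRange_one]
            simp
            omega
          simp [pvPlace, hnil, hle1]
      · have hb : (some pos == pos_removed) = false := beq_eq_false_iff_ne.mpr hskip
        simp [pvPlace, hb, hle, ih]
    · have hnil : PySem.List.pyRange pos (total + 1) 1 = [] := by
        rw [PySem.List.pyRange_one]
        simp
        omega
      simp [pvPlace, hnil]
      split <;> omega

-- ===== VERDICT (by name: the statement is the Claim_ definition above) =====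
theorem receive_and_sort_order_wave_spec : Claim_equal_receive_and_sort_order_wave := by
  intro order_wave grid_config pos_removed _ _
  unfold Spec_receive_and_sort_order_wave receive_and_sort_order_wave receive_and_sort_order_wave_alt
  rw [pvPlace_eq, pvAssign_items _ (PySem.Dict.nodup_keys_ofList order_wave)]
  · simp [show (PySem.Dict.empty : PySem.Dict Int (List (String × String))).items = [] from rfl]
  · exact (PySem.List.nodup_pyRange_one 1 _).filter _
  · intro p _; exact PySem.Dict.contains_empty p
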